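-- pv_equiv track=rewrite | github.com/CocoMarck/modulosUtilPy | logic/Modulo_Text.py | Only_Comment
-- ===== SOURCE A (Python) =====
-- def Only_Comment(
--     text=None,
--     comment='#'
-- ):
--     '''Obtener solo los comentarios de un texto'''
--     if (
--         '\n' in text and
--         comment in text
--     ):
--         # Cuando hay saltos de linea y comentarios
--
--         text_ready = ''
--         for line in text.split('\n'):
--             line = Only_Comment(text=line, comment=comment)
--             if not line == None:
--                 text_ready += f'{line}\n'
--
--         return text_ready[:-1]
--
--     elif comment in text:
--         # Cuando hay comentarios pero no saltos de linea
--         text = text.split(comment)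
--         return text[1]
--
--     else:
--         # No hay nada de comenarios
--         return None
-- ===== SOURCE B (Python) =====
-- def Only_Comment(
--     text=None,
--     comment='#'
-- ):
--     '''Obtener solo los comentarios de un texto'''
--     if comment not in text:
--         return None
--     parts = []
--     for line in text.split('\n'):
--         if comment in line:
--             parts.append(line.split(comment)[1])
--     return '\n'.join(parts)
-- ===== Notes on version B (the rewrite author's own statement) =====
-- stated objective: simpler
-- what changed: Replaces A's recursive three-branch structure (self-call per line, '+= line+\n' accumulation and the [:-1] trick) with a single guard plus one flat loop collecting line.split(comment)[1] into a list joined by '\n'.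
import Mathlib
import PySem

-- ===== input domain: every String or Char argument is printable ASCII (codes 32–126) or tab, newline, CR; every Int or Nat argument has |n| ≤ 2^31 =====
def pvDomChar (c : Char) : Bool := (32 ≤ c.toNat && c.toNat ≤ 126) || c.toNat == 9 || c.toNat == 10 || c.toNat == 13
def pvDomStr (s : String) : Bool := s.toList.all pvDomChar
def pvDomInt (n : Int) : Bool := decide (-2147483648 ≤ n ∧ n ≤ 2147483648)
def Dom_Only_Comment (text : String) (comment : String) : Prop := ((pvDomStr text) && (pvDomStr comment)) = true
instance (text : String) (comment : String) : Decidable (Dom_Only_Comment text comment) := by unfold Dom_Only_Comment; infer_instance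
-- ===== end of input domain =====

-- B replaces A's recursive three-branch structure by a single containment guard plus one flat
-- pass over the split lines whose extracted parts are '\n'-joined (objective: simpler).


-- ===== PORT A =====
-- A-side helpers: a structural description of text.split('\n') (pvLines) and the facts the
-- recursion's termination needs (each line of a text containing '\n' is strictly shorter).
def pvLines : List Char → List (List Char)
  | [] => [[]]
  | c :: r =>
    if c = '\n' then [] :: pvLines r
    else
      match pvLines r with
      | [] => [[c]]
      | h :: t => (c :: h) :: t

def pvConsHead (p : List Char) : List (List Char) → List (List Char)
  | [] => [p]
  | h :: t => (p ++ h) :: t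

theorem pvLines_ne_nil (cs : List Char) : pvLines cs ≠ [] := by
  cases cs with
  | nil => simp [pvLines]
  | cons c r =>
    simp only [pvLines]
    split
    · simp
    · split <;> simp

theorem pvGo_eq : ∀ (fuel : Nat) (l cur : List Char) (acc : List (List Char)), l.length < fuel →
    PySem.Chars.splitOn.go ['\n'] fuel l cur acc = acc.reverse ++ pvConsHead cur.reverse (pvLines l) := by
  intro fuel
  induction fuel with
  | zero => intro l cur acc h; omega
  | succ f ih =>
    intro l cur acc h
    cases l with
    | nil =>
      simp [PySem.Chars.splitOn.go, pvLines, pvConsHead]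
    | cons c rest =>
      rw [PySem.Chars.splitOn.go]
      by_cases hc : c = '\n'
      · have hp : List.isPrefixOf ['\n'] (c :: rest) = true := by simp [List.isPrefixOf, hc]
        simp only [hp, if_pos]
        rw [ih _ _ _ (by simp at h ⊢; omega)]
        simp [pvLines, hc]
        cases hl : pvLines rest with
        | nil => exact absurd hl (pvLines_ne_nil rest)
        | cons a b => simp [pvConsHead]
      · have hp : List.isPrefixOf ['\n'] (c :: rest) = false := by
          simp [List.isPrefixOf]; exact fun hh => absurd hh.symm hc
        simp only [hp]
        rw [ih rest (c :: cur) acc (by simp at h; omega)]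
        cases hl : pvLines rest with
        | nil => exact absurd hl (pvLines_ne_nil rest)
        | cons a b => simp [pvConsHead, pvLines, hc, hl]

theorem pvSplitOn_newline (cs : List Char) :
    PySem.Chars.splitOn cs ['\n'] = pvLines cs := by
  rw [PySem.Chars.splitOn, pvGo_eq _ _ _ _ (by omega)]
  cases hl : pvLines cs with
  | nil => exact absurd hl (pvLines_ne_nil cs)
  | cons a b => simp [pvConsHead]

theorem pvLines_len_le (cs : List Char) : ∀ l ∈ pvLines cs, l.length ≤ cs.length := by
  induction cs with
  | nil => simp [pvLines]
  | cons c r ih =>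
    intro l hl
    simp only [pvLines] at hl
    by_cases hc : c = '\n'
    · simp only [hc, if_pos rfl] at hl
      rcases List.mem_cons.1 hl with h | h
      · simp [h]
      · have := ih l h; simp; omega
    · simp only [if_neg hc] at hl
      cases hr : pvLines r with
      | nil => exact absurd hr (pvLines_ne_nil r)
      | cons a b =>
        rw [hr] at hl
        rcases List.mem_cons.1 hl with h | h
        · have := ih a (by rw [hr]; exact List.mem_cons_self)
          simp [h]; omega
        · have := ih l (by rw [hr]; exact List.mem_cons_of_mem _ h)
          simp; omega

theorem pvLines_len_lt (cs : List Char) (hnl : '\n' ∈ cs) :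
    ∀ l ∈ pvLines cs, l.length < cs.length := by
  induction cs with
  | nil => simp at hnl
  | cons c r ih =>
    intro l hl
    simp only [pvLines] at hl
    by_cases hc : c = '\n'
    · simp only [hc, if_pos rfl] at hl
      rcases List.mem_cons.1 hl with h | h
      · simp [h]
      · have := pvLines_len_le r l h; simp; omega
    · have hr' : '\n' ∈ r := by
        rcases List.mem_cons.1 hnl with h | h
        · exact absurd h.symm hc
        · exact h
      simp only [if_neg hc] at hl
      cases hr : pvLines r with
      | nil => exact absurd hr (pvLines_ne_nil r)
      | cons a b =>
        rw [hr] at hl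
        rcases List.mem_cons.1 hl with h | h
        · have := ih hr' a (by rw [hr]; exact List.mem_cons_self)
          simp [h]; omega
        · have := ih hr' l (by rw [hr]; exact List.mem_cons_of_mem _ h)
          simp; omega

-- termination fact cited by the port's decreasing_by
theorem pvSplit_lt (cs l : List Char) (h : PySem.Chars.isIn ['\n'] cs = true)
    (hl : l ∈ PySem.Chars.splitOn cs ['\n']) : l.length < cs.length := by
  have hmem : '\n' ∈ cs := (List.singleton_infix_iff _ _).1 ((PySem.Chars.isIn_iff_infix _ _).1 h)
  rw [pvSplitOn_newline] at hl
  exact pvLines_len_lt cs hmem l hl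

-- literal transliteration of A (on code points; Only_Comment wraps it on String):
-- branch 1: '\n' in text and comment in text — recurse per line, accumulate 'line\n', return [:-1]
-- branch 2: comment in text — return text.split(comment)[1]
-- branch 3: None.  (text.split('') — comment = '' — raises ValueError in Python: the split?/pyGet?
-- none falls through to none here; those inputs are excluded by Pre_Only_Comment.)
def pvOCA (cs com : List Char) : Option (List Char) :=
  if h : (PySem.Chars.isIn ['\n'] cs && PySem.Chars.isIn com cs) = true then
    let ready := (PySem.Chars.splitOn cs ['\n']).attach.foldl
      (fun acc line =>
        match pvOCA line.1 com with
        | some l => acc ++ l ++ ['\n']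
        | none => acc) []
    some (PySem.List.slice ready none (some (-1)))
  else if PySem.Chars.isIn com cs then
    match PySem.Chars.split? cs com with
    | some parts => PySem.List.pyGet? parts 1
    | none => none
  else
    none
termination_by cs.length
decreasing_by exact pvSplit_lt cs line.1 (Bool.and_eq_true_iff.1 h).1 line.2

def Only_Comment (text : String) (comment : String) : Option String :=
  (pvOCA text.toList comment.toList).map String.ofList

-- ===== PORT B =====
-- literal transliteration of Source B: guard 'comment in text', then one pass over text.split('\n')
-- collecting line.split(comment)[1] for the lines containing comment, joined by '\n'
def pvOCB (cs com : List Char) : Option (List Char) :=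
  if PySem.Chars.isIn com cs then
    let parts := (PySem.Chars.splitOn cs ['\n']).filterMap
      (fun line =>
        if PySem.Chars.isIn com line then
          (PySem.Chars.split? line com).bind (fun p => PySem.List.pyGet? p 1)
        else none)
    some (PySem.Chars.join ['\n'] parts)
  else none

def Only_Comment_alt (text : String) (comment : String) : Option String :=
  (pvOCB text.toList comment.toList).map String.ofList

-- ===== PRECONDITION & SPEC =====
-- Pre_ excludes only comment = '': there text.split('') raises ValueError in Python A (and in B).
def Pre_Only_Comment (text : String) (comment : String) : Prop := comment ≠ ""
instance (text : String) (comment : String) : Decidable (Pre_Only_Comment text comment) := by unfold Pre_Only_Comment; infer_instance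
def pvWitness_Only_Comment : String × String := ("x = 1 # set x\ny = 2 # set y", "#")

def Spec_Only_Comment (text : String) (comment : String) (out : Option String) : Prop := out = Only_Comment_alt text comment
instance (text : String) (comment : String) (out : Option String) : Decidable (Spec_Only_Comment text comment out) := by unfold Spec_Only_Comment; infer_instance

-- ===== CLAIM (what is proved, stated in full; the proofs are below) =====
def Claim_equal_Only_Comment : Prop := ∀ (text : String) (comment : String), Dom_Only_Comment text comment → Pre_Only_Comment text comment → Spec_Only_Comment text comment (Only_Comment text comment)

-- ===== LEMMAS AND PROOFS =====

theorem pvGo_len_ge : ∀ (fuel : Nat) (sep l cur : List Char) (acc : List (List Char)),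
    acc.length + 1 ≤ (PySem.Chars.splitOn.go sep fuel l cur acc).length := by
  intro fuel
  induction fuel with
  | zero => intro sep l cur acc; rw [PySem.Chars.splitOn.go]; simp
  | succ f ih =>
    intro sep l cur acc
    cases l with
    | nil => rw [PySem.Chars.splitOn.go]; simp; omega
    | cons c rest =>
      rw [PySem.Chars.splitOn.go]
      by_cases hp : sep.isPrefixOf (c :: rest) = true
      · simp only [hp, if_pos]
        have := ih sep (List.drop sep.length (c :: rest)) [] (cur.reverse :: acc)
        simp at this ⊢; omega
      · simp only [Bool.not_eq_true] at hp
        simp only [hp]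
        exact ih sep rest (c :: cur) acc

theorem pvGo_len_two : ∀ (fuel : Nat) (sep l cur : List Char) (acc : List (List Char)),
    l.length < fuel → sep ≠ [] → sep <:+: l →
    acc.length + 2 ≤ (PySem.Chars.splitOn.go sep fuel l cur acc).length := by
  intro fuel
  induction fuel with
  | zero =>
    intro sep l cur acc hf hsep hinf
    omega
  | succ f ih =>
    intro sep l cur acc hf hsep hinf
    cases l with
    | nil =>
      exact absurd (List.eq_nil_of_infix_nil hinf) hsep
    | cons c rest =>
      rw [PySem.Chars.splitOn.go]
      by_cases hp : sep.isPrefixOf (c :: rest) = true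
      · simp only [hp, if_pos]
        have := pvGo_len_ge f sep (List.drop sep.length (c :: rest)) [] (cur.reverse :: acc)
        simp at this ⊢; omega
      · simp only [Bool.not_eq_true] at hp
        simp only [hp]
        apply ih sep rest (c :: cur) acc (by simp at hf; omega) hsep
        rcases List.infix_cons_iff.1 hinf with h | h
        · exact absurd (List.isPrefixOf_iff_prefix.2 h) (by simp [hp])
        · exact h

-- comment occurs in cs ⇒ split produces at least two parts, so [1] exists
theorem pvSplit_two (cs com : List Char) (hcom : com ≠ []) (h : PySem.Chars.isIn com cs = true) :
    2 ≤ (PySem.Chars.splitOn cs com).length := by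
  have hinf : com <:+: cs := (PySem.Chars.isIn_iff_infix _ _).1 h
  have := pvGo_len_two (cs.length + 1) com cs [] [] (by omega) hcom hinf
  simpa [PySem.Chars.splitOn] using this

theorem pvG_some (cs com : List Char) (hcom : com ≠ []) (h : PySem.Chars.isIn com cs = true) :
    (PySem.Chars.split? cs com).bind (fun p => PySem.List.pyGet? p 1) =
      PySem.List.pyGet? (PySem.Chars.splitOn cs com) 1 ∧
    ∃ v, PySem.List.pyGet? (PySem.Chars.splitOn cs com) 1 = some v := by
  constructor
  · simp [PySem.Chars.split?, hcom]
  · have h2 := pvSplit_two cs com hcom h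
    exact ⟨_, PySem.List.pyGet?_ofNat _ 1 (by omega)⟩

theorem pvIsIn_nl (cs : List Char) : PySem.Chars.isIn ['\n'] cs = true ↔ '\n' ∈ cs := by
  rw [PySem.Chars.isIn_iff_infix, List.singleton_infix_iff]

theorem pvLines_no_nl (cs : List Char) : ∀ l ∈ pvLines cs, '\n' ∉ l := by
  induction cs with
  | nil => simp [pvLines]
  | cons c r ih =>
    intro l hl
    simp only [pvLines] at hl
    by_cases hc : c = '\n'
    · simp only [hc, if_pos rfl] at hl
      rcases List.mem_cons.1 hl with h | h
      · simp [h]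
      · exact ih l h
    · simp only [if_neg hc] at hl
      cases hr : pvLines r with
      | nil => exact absurd hr (pvLines_ne_nil r)
      | cons a b =>
        rw [hr] at hl
        rcases List.mem_cons.1 hl with h | h
        · subst h
          intro hmem
          rcases List.mem_cons.1 hmem with h | h
          · exact hc h.symm
          · exact ih a (by rw [hr]; exact List.mem_cons_self) h
        · exact ih l (by rw [hr]; exact List.mem_cons_of_mem _ h)

theorem pvLines_of_no_nl (cs : List Char) (h : '\n' ∉ cs) : pvLines cs = [cs] := by
  induction cs with
  | nil => simp [pvLines]
  | cons c r ih =>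
    have hc : c ≠ '\n' := fun hh => h (by simp [hh])
    have hr : '\n' ∉ r := fun hh => h (List.mem_cons_of_mem _ hh)
    simp [pvLines, hc, ih hr]

-- A on a line without '\n': the recursive branch is dead; value = the split?/[1] expression
theorem pvOCA_line (line com : List Char) (hcom : com ≠ []) (hnl : '\n' ∉ line) :
    pvOCA line com =
      if PySem.Chars.isIn com line then
        (PySem.Chars.split? line com).bind (fun p => PySem.List.pyGet? p 1)
      else none := by
  have hnl' : PySem.Chars.isIn ['\n'] line = false := by
    rw [← Bool.not_eq_true, pvIsIn_nl]; exact hnl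
  rw [pvOCA]
  simp only [hnl', Bool.false_and]
  by_cases hin : PySem.Chars.isIn com line = true
  · simp [hin, PySem.Chars.split?, hcom]
  · simp [hin]

-- the accumulation loop = flatten of the '\n'-suffixed extracted parts
def pvStep (f : List Char → Option (List Char)) (acc line : List Char) : List Char :=
  match f line with
  | some l => acc ++ l ++ ['\n']
  | none => acc

theorem pvFold_eq (f : List Char → Option (List Char)) :
    ∀ (L : List (List Char)) (acc : List Char),
    L.foldl (pvStep f) acc
      = acc ++ ((L.filterMap f).map (· ++ ['\n'])).flatten := by
  intro L
  induction L with
  | nil => simp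
  | cons x t ih =>
    intro acc
    cases hx : f x with
    | none => simp only [List.foldl_cons, pvStep, hx, List.filterMap_cons, ih]
    | some l =>
      simp only [List.foldl_cons, pvStep, hx, List.filterMap_cons]
      rw [ih]
      simp [List.append_assoc]

theorem pvDropLast_join (c : Char) :
    ∀ (parts : List (List Char)),
    ((parts.map (· ++ [c])).flatten).dropLast = List.intercalate [c] parts := by
  intro parts
  induction parts with
  | nil => simp [List.intercalate]
  | cons p t ih =>
    cases t with
    | nil => simp [List.intercalate]
    | cons q r =>
      have hne : ((List.map (· ++ [c]) (q :: r)).flatten) ≠ [] := by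
        simp
      rw [List.map_cons, List.flatten_cons, List.dropLast_append_of_ne_nil hne, ih]
      rw [show List.intercalate [c] (p :: q :: r) = p ++ [c] ++ List.intercalate [c] (q :: r) by
        simp [List.intercalate, List.intersperse]]

-- the two ports agree for every nonempty comment
theorem pvOC_eq (cs com : List Char) (hcom : com ≠ []) : pvOCA cs com = pvOCB cs com := by
  by_cases hin : PySem.Chars.isIn com cs = true
  · by_cases hnl : '\n' ∈ cs
    · -- branch 1 of A vs B's loop
      have hnl' : PySem.Chars.isIn ['\n'] cs = true := (pvIsIn_nl cs).2 hnl
      rw [pvOCA, pvOCB]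
      simp only [hnl', hin, Bool.and_self, if_pos, reduceDIte, if_pos]
      congr 1
      rw [show (fun acc (line : {x // x ∈ PySem.Chars.splitOn cs ['\n']}) =>
            match pvOCA (↑line) com with
            | some l => acc ++ l ++ ['\n']
            | none => acc)
          = fun acc (line : {x // x ∈ PySem.Chars.splitOn cs ['\n']}) =>
              pvStep (fun x => pvOCA x com) acc ↑line from rfl]
      rw [List.foldl_attach]
      rw [pvFold_eq (fun line => pvOCA line com) _ []]
      rw [List.filterMap_congr (g := fun line =>
        if PySem.Chars.isIn com line then
          (PySem.Chars.split? line com).bind (fun p => PySem.List.pyGet? p 1)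
        else none)
        (by
          intro line hline
          rw [pvSplitOn_newline] at hline
          exact pvOCA_line line com hcom (pvLines_no_nl cs line hline))]
      rw [PySem.List.slice_to_neg_one, List.nil_append, pvDropLast_join]
      simp [PySem.Chars.join]
    · -- no newline: branch 2 of A vs B's singleton loop
      have hnl' : PySem.Chars.isIn ['\n'] cs = false := by
        rw [← Bool.not_eq_true, pvIsIn_nl]; exact hnl
      have hone : PySem.Chars.splitOn cs ['\n'] = [cs] := by
        rw [pvSplitOn_newline, pvLines_of_no_nl cs hnl]
      obtain ⟨hg, v, hv⟩ := pvG_some cs com hcom hin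
      rw [pvOCA, pvOCB]
      simp only [hnl', Bool.false_and, reduceDIte, hin, if_pos, hone]
      simp [List.filterMap_cons, hin, hg, hv, PySem.Chars.join, PySem.Chars.split?, hcom,
        List.intercalate]
  · rw [pvOCA, pvOCB]
    simp [hin]

theorem pvToList_ne (comment : String) (h : comment ≠ "") : comment.toList ≠ [] := by
  simp [h]

-- ===== VERDICT (by name: the statement is the Claim_ definition above) =====
theorem Only_Comment_spec : Claim_equal_Only_Comment := by
  intro text comment _ hpre
  unfold Spec_Only_Comment Only_Comment Only_Comment_alt
  rw [pvOC_eq _ _ (pvToList_ne comment hpre)]
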